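-- pv_equiv track=rewrite | github.com/smerzbach/whispertype | installer.py | pick_suggested_default
-- ===== SOURCE A (Python) =====
-- def pick_suggested_default(bins: list[str], previous: str) -> str:
--     if previous in bins:
--         return previous
--     for candidate in (
--         "ggml-base.en.bin",
--         "ggml-small.en.bin",
--         "ggml-tiny.en.bin",
--         "ggml-base.bin",
--         "ggml-small.bin",
--     ):
--         if candidate in bins:
--             return candidate
--     return bins[0] if bins else ""
-- ===== SOURCE B (Python) =====
-- _PREFERRED = [
--     "ggml-base.en.bin",
--     "ggml-small.en.bin",
--     "ggml-tiny.en.bin",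
--     "ggml-base.bin",
--     "ggml-small.bin",
-- ]
--
--
-- def _rank(b: str, previous: str) -> int:
--     if b == previous:
--         return -1
--     try:
--         return _PREFERRED.index(b)
--     except ValueError:
--         return len(_PREFERRED)
--
--
-- def pick_suggested_default(bins: list[str], previous: str) -> str:
--     if not bins:
--         return ""
--     return min(bins, key=lambda b: _rank(b, previous))
-- ===== Notes on version B (the rewrite author's own statement) =====
-- stated objective: alternative
-- what changed: Instead of probing membership of previous and each preferred candidate in bins, B assigns every bin a priority rank (-1 for previous, the candidate's position in the fixed preference list, 5 otherwise) and selects the first bin of minimal rank with a single min() pass over bins.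
import Mathlib
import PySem

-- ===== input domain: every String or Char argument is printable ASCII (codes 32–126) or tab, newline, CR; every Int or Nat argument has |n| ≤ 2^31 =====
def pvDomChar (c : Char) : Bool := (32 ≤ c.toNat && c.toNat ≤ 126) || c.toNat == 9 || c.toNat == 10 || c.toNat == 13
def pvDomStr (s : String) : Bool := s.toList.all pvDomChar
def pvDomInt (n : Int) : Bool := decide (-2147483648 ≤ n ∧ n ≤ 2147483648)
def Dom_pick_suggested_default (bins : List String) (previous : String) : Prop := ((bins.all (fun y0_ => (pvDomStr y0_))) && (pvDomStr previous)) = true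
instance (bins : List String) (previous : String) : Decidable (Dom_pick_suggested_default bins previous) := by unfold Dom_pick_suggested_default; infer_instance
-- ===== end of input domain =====

-- B replaces A's preference-order membership probes by one min() pass over bins
-- with a fixed rank key (objective: alternative decomposition, same behaviour).

-- the fixed preference list shared by both sources (a tuple in A, _PREFERRED in B)
def pvPreferred : List String :=
  ["ggml-base.en.bin", "ggml-small.en.bin", "ggml-tiny.en.bin",
   "ggml-base.bin", "ggml-small.bin"]

-- ===== PORT A =====
-- the 'for candidate in (…): if candidate in bins: return candidate' loop
def pickLoopA (bins : List String) : List String → Option String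
  | [] => none
  | c :: rest => if c ∈ bins then some c else pickLoopA bins rest

def pick_suggested_default (bins : List String) (previous : String) : String :=
  if previous ∈ bins then previous
  else
    match pickLoopA bins pvPreferred with
    | some c => c
    | none =>
      match bins with
      | [] => ""          -- 'return "" '
      | b :: _ => b        -- 'return bins[0]'

-- ===== PORT B =====
-- _rank(b, previous): -1 for previous, position in _PREFERRED, else len(_PREFERRED) = 5
def rankB (previous b : String) : Int :=
  if b = previous then -1
  else
    match PySem.List.index? pvPreferred b with
    | some i => (i : Int)
    | none => 5

def pick_suggested_default_alt (bins : List String) (previous : String) : String :=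
  match bins with
  | [] => ""
  | _ :: _ => (PySem.List.min? bins (rankB previous)).getD ""

-- ===== PRECONDITION & SPEC =====
def Spec_pick_suggested_default (bins : List String) (previous : String) (out : String) : Prop := out = pick_suggested_default_alt bins previous
instance (bins : List String) (previous : String) (out : String) : Decidable (Spec_pick_suggested_default bins previous out) := by unfold Spec_pick_suggested_default; infer_instance

-- ===== CLAIM (what is proved, stated in full; the proofs are below) =====
def Claim_equal_pick_suggested_default : Prop := ∀ (bins : List String) (previous : String), Dom_pick_suggested_default bins previous → Spec_pick_suggested_default bins previous (pick_suggested_default bins previous)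

-- ===== LEMMAS AND PROOFS =====

lemma rank_ge_neg1 (previous b : String) : -1 ≤ rankB previous b := by
  unfold rankB
  split_ifs with h
  · omega
  · cases hi : PySem.List.index? pvPreferred b with
    | none => decide
    | some i => show (-1 : Int) ≤ (i : Int); omega

lemma rank_self (previous : String) : rankB previous previous = -1 := by
  simp [rankB]

lemma rank_eq_neg1_iff (previous b : String) : rankB previous b = -1 ↔ b = previous := by
  constructor
  · intro h
    unfold rankB at h
    split_ifs at h with hb
    · exact hb
    · cases hi : PySem.List.index? pvPreferred b with
      | none => rw [hi] at h; simp at h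
      | some i => rw [hi] at h; have h' : (i : Int) = -1 := h; omega
  · intro h; subst h; exact rank_self _

-- rank of the k-th preferred candidate when it is not `previous`
lemma rank_preferred (previous : String) (k : Nat) (hk : k < 5)
    (hne : pvPreferred.getD k "" ≠ previous) :
    rankB previous (pvPreferred.getD k "") = (k : Int) := by
  unfold rankB
  rw [if_neg hne]
  interval_cases k <;> decide

-- a bin with rank ≤ k (k < 5) that is not `previous` is one of the first k+1 candidates
lemma rank_le_imp_preferred (previous m : String) (k : Nat) (hk : k < 5)
    (hne : m ≠ previous) (hle : rankB previous m ≤ (k : Int)) :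
    ∃ i : Nat, i ≤ k ∧ pvPreferred.getD i "" = m := by
  unfold rankB at hle
  rw [if_neg hne] at hle
  cases hi : PySem.List.index? pvPreferred m with
  | none =>
    rw [hi] at hle
    have h5 : (5 : Int) ≤ (k : Int) := hle
    omega
  | some i =>
    rw [hi] at hle
    have hik : (i : Int) ≤ (k : Int) := hle
    obtain ⟨hlt, hm, -⟩ := PySem.List.getElem_of_index?_eq_some hi
    exact ⟨i, by omega, by rw [List.getD_eq_getElem _ _ hlt]; exact hm⟩

-- a foldl whose step fixes `some m` stays at `some m`
lemma foldl_fix {α β : Type} (f : Option β → α → Option β) (m : β) (xs : List α)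
    (h : ∀ y ∈ xs, f (some m) y = some m) : xs.foldl f (some m) = some m := by
  induction xs with
  | nil => rfl
  | cons x t ih =>
    rw [List.foldl_cons, h x (by simp)]
    exact ih (fun y hy => h y (by simp [hy]))

-- min? with a constant key returns the head
lemma min?_const_key {α : Type} (xs : List α) (key : α → Int) (c : Int)
    (h : ∀ y ∈ xs, key y = c) : PySem.List.min? xs key = xs.head? := by
  cases xs with
  | nil => rfl
  | cons x t =>
    unfold PySem.List.min?
    rw [List.foldl_cons]
    show List.foldl _ (some x) t = some x
    refine foldl_fix _ x t (fun y hy => ?_)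
    have hyx : key y = key x := by rw [h y (by simp [hy]), h x (by simp)]
    show (if key y < key x then some y else some x) = some x
    rw [hyx]
    simp

-- B returns `previous` when it occurs in bins
lemma alt_of_prev (bins : List String) (previous : String) (hp : previous ∈ bins) :
    pick_suggested_default_alt bins previous = previous := by
  cases bins with
  | nil => cases hp
  | cons b t =>
    unfold pick_suggested_default_alt
    cases hm : PySem.List.min? (b :: t) (rankB previous) with
    | none => exact absurd ((PySem.List.min?_eq_none_iff _ _).mp hm) (by simp)
    | some m =>
      have h1 : rankB previous m ≤ rankB previous previous :=
        PySem.List.min?_isMin hm previous hp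
      rw [rank_self] at h1
      have h2 := rank_ge_neg1 previous m
      have : m = previous := (rank_eq_neg1_iff previous m).mp (by omega)
      simp [this]

-- B returns the k-th preferred candidate when previous and all earlier candidates are absent
lemma alt_of_candidate (bins : List String) (previous : String) (k : Nat) (hk : k < 5)
    (hp : previous ∉ bins)
    (hmem : pvPreferred.getD k "" ∈ bins)
    (hearlier : ∀ j : Nat, j < k → pvPreferred.getD j "" ∉ bins) :
    pick_suggested_default_alt bins previous = pvPreferred.getD k "" := by
  cases bins with
  | nil => cases hmem
  | cons b t =>
    unfold pick_suggested_default_alt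
    cases hm : PySem.List.min? (b :: t) (rankB previous) with
    | none => exact absurd ((PySem.List.min?_eq_none_iff _ _).mp hm) (by simp)
    | some m =>
      have hmmem : m ∈ b :: t := PySem.List.min?_mem hm
      have hmne : m ≠ previous := fun h => hp (h ▸ hmmem)
      have hck : pvPreferred.getD k "" ≠ previous := fun h => hp (h ▸ hmem)
      have h1 : rankB previous m ≤ (k : Int) := by
        have := PySem.List.min?_isMin hm _ hmem
        rwa [rank_preferred previous k hk hck] at this
      obtain ⟨i, hik, him⟩ := rank_le_imp_preferred previous m k hk hmne h1
      have hik' : i = k := by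
        by_contra hne
        exact hearlier i (by omega) (him ▸ hmmem)
      subst hik'
      simp [← him]

-- when previous and all five candidates are absent, every bin has rank 5
lemma rank_all_five (bins : List String) (previous : String)
    (hp : previous ∉ bins)
    (habs : ∀ j : Nat, j < 5 → pvPreferred.getD j "" ∉ bins) :
    ∀ y ∈ bins, rankB previous y = 5 := by
  intro y hy
  have hyp : y ≠ previous := fun h => hp (h ▸ hy)
  unfold rankB
  rw [if_neg hyp]
  cases hi : PySem.List.index? pvPreferred y with
  | none => rfl
  | some i =>
    obtain ⟨hlt, hyi, -⟩ := PySem.List.getElem_of_index?_eq_some hi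
    have h5 : i < 5 := by simpa [pvPreferred] using hlt
    have : pvPreferred.getD i "" = y := by rw [List.getD_eq_getElem _ _ hlt]; exact hyi
    exact absurd (this ▸ hy) (habs i h5)

-- ===== VERDICT (by name: the statement is the Claim_ definition above) =====
theorem pick_suggested_default_spec : Claim_equal_pick_suggested_default := by
  intro bins previous _
  unfold Spec_pick_suggested_default pick_suggested_default
  by_cases hp : previous ∈ bins
  · rw [if_pos hp, alt_of_prev bins previous hp]
  · rw [if_neg hp]
    by_cases h0 : "ggml-base.en.bin" ∈ bins
    · simp only [pickLoopA, pvPreferred, if_pos h0]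
      rw [alt_of_candidate bins previous 0 (by omega) hp h0 (by omega)]; rfl
    · by_cases h1 : "ggml-small.en.bin" ∈ bins
      · simp only [pickLoopA, pvPreferred, if_neg h0, if_pos h1]
        rw [alt_of_candidate bins previous 1 (by omega) hp h1
          (fun j hj => by interval_cases j; exact h0)]
        rfl
      · by_cases h2 : "ggml-tiny.en.bin" ∈ bins
        · simp only [pickLoopA, pvPreferred, if_neg h0, if_neg h1, if_pos h2]
          rw [alt_of_candidate bins previous 2 (by omega) hp h2
            (fun j hj => by
              interval_cases j
              · exact h0
              · exact h1)]
          rfl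
        · by_cases h3 : "ggml-base.bin" ∈ bins
          · simp only [pickLoopA, pvPreferred, if_neg h0, if_neg h1, if_neg h2, if_pos h3]
            rw [alt_of_candidate bins previous 3 (by omega) hp h3
              (fun j hj => by
                interval_cases j
                · exact h0
                · exact h1
                · exact h2)]
            rfl
          · by_cases h4 : "ggml-small.bin" ∈ bins
            · simp only [pickLoopA, pvPreferred, if_neg h0, if_neg h1, if_neg h2, if_neg h3, if_pos h4]
              rw [alt_of_candidate bins previous 4 (by omega) hp h4
                (fun j hj => by
                  interval_cases j
                  · exact h0
                  · exact h1
                  · exact h2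
                  · exact h3)]
              rfl
            · simp only [pickLoopA, pvPreferred, if_neg h0, if_neg h1, if_neg h2, if_neg h3, if_neg h4]
              have hall := rank_all_five bins previous hp
                (fun j hj => by
                  interval_cases j
                  · exact h0
                  · exact h1
                  · exact h2
                  · exact h3
                  · exact h4)
              cases bins with
              | nil => rfl
              | cons b t =>
                unfold pick_suggested_default_alt
                rw [min?_const_key _ _ 5 hall]
                rfl
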